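-- pv_equiv track=rewrite | github.com/ZhongkuiMa/torchonnx | src/torchonnx/generate/_handlers/_operations.py | _convert_expand_semantics
-- ===== SOURCE A (Python) =====
-- def _convert_expand_semantics(data_shape: tuple[int, ...], target_shape: list[int]) -> list[int]:
--     """Convert ONNX expand semantics to PyTorch expand format.
--
--     In ONNX: if target[i]==1 and data[i]!=1, expand keeps original dimension.
--     This function converts to PyTorch format using -1 to indicate "keep original".
--
--     :param data_shape: Input data shape
--     :param target_shape: Target shape from constant
--     :return: Converted shape with -1 for dimensions to keep
--     """
--     converted = []
--     data_ndim = len(data_shape)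
--     target_ndim = len(target_shape)
--
--     for i, t in enumerate(target_shape):
--         if i < target_ndim - data_ndim:
--             # New dimension from target
--             converted.append(int(t))
--         else:
--             # Existing dimension: check if we should keep original (use -1)
--             data_idx = i - (target_ndim - data_ndim)
--             if t == 1 and data_shape[data_idx] != 1:
--                 converted.append(-1)  # Keep original dimension
--             else:
--                 converted.append(int(t))
--
--     return converted
-- ===== SOURCE B (Python) =====
-- def _convert_expand_semantics(data_shape, target_shape):
--     # Walk both shapes back-to-front: consume data dims off the end with pop(),
--     # (missing ones count as 1), emit into a reversed buffer, then flip it.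
--     remaining = list(data_shape)
--     rev = []
--     for t in reversed(target_shape):
--         a = remaining.pop() if remaining else 1
--         rev.append(-1 if t == 1 and a != 1 else int(t))
--     rev.reverse()
--     return rev
-- ===== Notes on version B (the rewrite author's own statement) =====
-- stated objective: alternative
-- what changed: Replaces A's forward enumerate loop with offset/index branching by a back-to-front traversal that consumes the data shape as a stack (pop, defaulting to 1 when exhausted), building the result reversed and flipping it at the end; no index arithmetic at all.
import Mathlib
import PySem

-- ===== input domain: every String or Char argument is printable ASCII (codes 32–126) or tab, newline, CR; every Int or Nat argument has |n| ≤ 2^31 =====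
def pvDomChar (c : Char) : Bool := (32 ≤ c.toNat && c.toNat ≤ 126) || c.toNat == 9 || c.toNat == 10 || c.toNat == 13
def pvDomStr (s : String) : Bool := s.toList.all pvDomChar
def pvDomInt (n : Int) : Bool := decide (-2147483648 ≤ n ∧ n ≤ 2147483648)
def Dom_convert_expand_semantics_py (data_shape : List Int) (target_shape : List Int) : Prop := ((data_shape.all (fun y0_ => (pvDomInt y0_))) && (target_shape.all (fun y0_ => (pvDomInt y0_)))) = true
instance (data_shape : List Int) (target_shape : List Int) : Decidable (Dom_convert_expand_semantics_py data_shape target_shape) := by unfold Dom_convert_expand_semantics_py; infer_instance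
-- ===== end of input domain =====

-- B replaces A's forward enumerate loop with offset/index arithmetic by a back-to-front
-- stack walk (pop the data shape, default 1) building the result reversed (alternative; same cost).

-- ===== PORT A =====
-- literal port of A: enumerate loop, branch on i < target_ndim - data_ndim, index data_shape at i - offset.
-- (the .getD 0 default of pyGet? is never reached: the index is in range whenever the branch is taken)
def convert_expand_semantics_py (data_shape : List Int) (target_shape : List Int) : List Int :=
  let data_ndim : Int := data_shape.length
  let target_ndim : Int := target_shape.length
  (PySem.List.enumerate target_shape).foldl
    (fun converted it =>
      let i := it.1
      let t := it.2
      if i < target_ndim - data_ndim then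
        converted ++ [t]
      else
        let data_idx := i - (target_ndim - data_ndim)
        if t = 1 ∧ (PySem.List.pyGet? data_shape data_idx).getD 0 ≠ 1 then
          converted ++ [-1]
        else
          converted ++ [t])
    []

-- ===== PORT B =====
-- literal port of Source B: fold over reversed target, pop the remaining data off the end
-- (`remaining.pop() if remaining else 1` = getLastD 1 / dropLast), reverse the buffer at the end.
def convert_expand_semantics_py_alt (data_shape : List Int) (target_shape : List Int) : List Int :=
  let res := target_shape.reverse.foldl
    (fun (st : List Int × List Int) t =>
      let a := st.1.getLastD 1
      (st.1.dropLast, st.2 ++ [if t = 1 ∧ a ≠ 1 then -1 else t]))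
    (data_shape, [])
  res.2.reverse

-- ===== PRECONDITION & SPEC =====
def Spec_convert_expand_semantics_py (data_shape : List Int) (target_shape : List Int) (out : List Int) : Prop := out = convert_expand_semantics_py_alt data_shape target_shape
instance (data_shape : List Int) (target_shape : List Int) (out : List Int) : Decidable (Spec_convert_expand_semantics_py data_shape target_shape out) := by unfold Spec_convert_expand_semantics_py; infer_instance

-- ===== CLAIM (what is proved, stated in full; the proofs are below) =====
def Claim_equal_convert_expand_semantics_py : Prop := ∀ (data_shape : List Int) (target_shape : List Int), Dom_convert_expand_semantics_py data_shape target_shape → Spec_convert_expand_semantics_py data_shape target_shape (convert_expand_semantics_py data_shape target_shape)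

-- ===== LEMMAS AND PROOFS =====

-- the per-element conversion both loops perform
def pvConv (p : Int × Int) : Int := if p.1 = 1 ∧ p.2 ≠ 1 then -1 else p.1

-- characterisation of B's pop-fold: it maps pvConv over rs zipped with
-- (reversed data padded on the right with ones), provided the padding suffices.
theorem popFold_eq (rs : List Int) : ∀ (ds acc : List Int) (k : Nat), rs.length ≤ ds.length + k →
    (rs.foldl (fun (st : List Int × List Int) t =>
        (st.1.dropLast, st.2 ++ [if t = 1 ∧ st.1.getLastD 1 ≠ 1 then -1 else t])) (ds, acc)).2
    = acc ++ (rs.zip (ds.reverse ++ List.replicate k (1:Int))).map pvConv := by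
  induction rs with
  | nil => intro ds acc k _; simp
  | cons t rs' ih =>
    intro ds acc k hk
    rcases ds.eq_nil_or_concat with hds | ⟨l, b, hds⟩
    · subst hds
      obtain ⟨k', rfl⟩ : ∃ k', k = k' + 1 := by
        refine ⟨k - 1, ?_⟩; simp at hk; omega
      simp only [List.foldl_cons, List.dropLast_nil, List.getLastD_nil]
      rw [ih [] _ k' (by simp at hk ⊢; omega)]
      simp [List.replicate_succ, pvConv]
    · subst hds
      simp only [List.concat_eq_append, List.foldl_cons, List.dropLast_concat,
        List.getLastD_concat]
      rw [ih l _ k (by simp at hk ⊢; omega)]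
      simp [pvConv]

theorem main_eq (ds ts : List Int) :
    convert_expand_semantics_py ds ts = convert_expand_semantics_py_alt ds ts := by
  unfold convert_expand_semantics_py convert_expand_semantics_py_alt
  simp only []
  -- rewrite A's foldl into a map over enumerate
  have hbody : (fun (converted : List Int) (it : Int × Int) =>
      if it.1 < (ts.length : Int) - (ds.length : Int) then converted ++ [it.2]
      else
        if it.2 = 1 ∧ (PySem.List.pyGet? ds (it.1 - ((ts.length : Int) - (ds.length : Int)))).getD 0 ≠ 1 then converted ++ [-1]
        else converted ++ [it.2]) =
      (fun converted it => converted ++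
        [if it.1 < (ts.length : Int) - (ds.length : Int) then it.2
         else if it.2 = 1 ∧ (PySem.List.pyGet? ds (it.1 - ((ts.length : Int) - (ds.length : Int)))).getD 0 ≠ 1 then -1
         else it.2]) := by
    funext c it; split_ifs <;> rfl
  rw [hbody, PySem.List.foldl_append_singleton_eq_map]
  -- rewrite B's foldl via the pop-fold characterisation (pad with ts.length ones)
  rw [popFold_eq ts.reverse ds [] ts.length (by simp)]
  simp only [List.nil_append]
  apply List.ext_getElem
  · simp [PySem.List.length_enumerate, List.length_zip]
  · intro j h1 h2
    have hj : j < ts.length := by simpa [PySem.List.length_enumerate] using h1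
    rw [List.getElem_map, PySem.List.getElem_enumerate, List.getElem_reverse]
    have hlen : (List.map pvConv (ts.reverse.zip (ds.reverse ++ List.replicate ts.length (1:Int)))).length - 1 - j
        = ts.length - 1 - j := by
      simp [List.length_zip]
    simp only [hlen]
    have hm : ts.length - 1 - j < (ts.reverse.zip (ds.reverse ++ List.replicate ts.length (1:Int))).length := by
      simp [List.length_zip]; omega
    rw [List.getElem_map, List.getElem_zip]
    have hrt : ts.reverse[ts.length - 1 - j]'(by simp; omega) = ts[j] := by
      rw [List.getElem_reverse]; congr 1; omega
    simp only [Int.zero_add, hrt, pvConv]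
    by_cases hpad : ts.length - 1 - j < ds.length
    · -- data region: A takes the else branch; the padded list yields the matching data dim
      have hlt : ¬ ((j : Int) < (ts.length : Int) - (ds.length : Int)) := by
        omega
      rw [if_neg hlt]
      have hYj : (ds.reverse ++ List.replicate ts.length (1:Int))[ts.length - 1 - j]'(by simp; omega)
          = ds[ds.length - 1 - (ts.length - 1 - j)]'(by omega) := by
        rw [List.getElem_append_left (by simpa using hpad), List.getElem_reverse]
      have hgi : (j : Int) - ((ts.length : Int) - (ds.length : Int))
          = ((ds.length - 1 - (ts.length - 1 - j) : Nat) : Int) := by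
        omega
      have hget : (PySem.List.pyGet? ds ((j : Int) - ((ts.length : Int) - (ds.length : Int)))).getD 0
          = ds[ds.length - 1 - (ts.length - 1 - j)]'(by omega) := by
        rw [hgi, PySem.List.pyGet?_natCast, List.getElem?_eq_getElem (by omega)]
        simp
      rw [hget, hYj]
    · -- padding region: A takes the first branch; the padded list yields 1 so B emits ts[j] too
      have hlt : (j : Int) < (ts.length : Int) - (ds.length : Int) := by
        omega
      have hYj : (ds.reverse ++ List.replicate ts.length (1:Int))[ts.length - 1 - j]'(by simp; omega) = 1 := by
        rw [List.getElem_append_right (by simpa using hpad)]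
        simp
      rw [if_pos hlt, hYj]
      by_cases ht1 : ts[j] = 1 <;> simp [ht1]

-- ===== VERDICT (by name: the statement is the Claim_ definition above) =====
theorem convert_expand_semantics_py_spec : Claim_equal_convert_expand_semantics_py := by
  intro ds ts _
  unfold Spec_convert_expand_semantics_py
  exact main_eq ds ts
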